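-- pv_equiv track=rewrite | github.com/qlnfm/SuperCCM | superccm/impl/utils/tools.py | is_4_connected
-- ===== SOURCE A (Python) =====
-- def is_4_connected(points):
--     if not points:
--         return False
--
--     point_set = set(points)
--     visited = set()
--
--     start = next(iter(point_set))
--     stack = [start]
--     visited.add(start)
--
--     directions = [(1, 0), (-1, 0), (0, 1), (0, -1)]
--
--     # DFS
--     while stack:
--         x, y = stack.pop()
--         for dx, dy in directions:
--             neighbor = (x + dx, y + dy)
--             if neighbor in point_set and neighbor not in visited:
--                 visited.add(neighbor)
--                 stack.append(neighbor)
--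
--     return len(visited) == len(point_set)
-- ===== SOURCE B (Python) =====
-- def is_4_connected(points):
--     if not points:
--         return False
--
--     point_set = set(points)
--     visited = {next(iter(point_set))}
--
--     # Round-based saturation: len(point_set) rounds each add every in-set
--     # 4-neighbor of the current visited set; no stack/queue is maintained.
--     for _ in range(len(point_set)):
--         for (x, y) in list(visited):
--             for n in ((x + 1, y), (x - 1, y), (x, y + 1), (x, y - 1)):
--                 if n in point_set:
--                     visited.add(n)
--
--     return len(visited) == len(point_set)
-- ===== Notes on version B (the rewrite author's own statement) =====
-- stated objective: alternative
-- what changed: Replaces the DFS with an explicit stack/visited bookkeeping by a fixed-point saturation: len(point_set) rounds, each adding every in-set 4-neighbor of the current visited set, with no worklist at all.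
import Mathlib
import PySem

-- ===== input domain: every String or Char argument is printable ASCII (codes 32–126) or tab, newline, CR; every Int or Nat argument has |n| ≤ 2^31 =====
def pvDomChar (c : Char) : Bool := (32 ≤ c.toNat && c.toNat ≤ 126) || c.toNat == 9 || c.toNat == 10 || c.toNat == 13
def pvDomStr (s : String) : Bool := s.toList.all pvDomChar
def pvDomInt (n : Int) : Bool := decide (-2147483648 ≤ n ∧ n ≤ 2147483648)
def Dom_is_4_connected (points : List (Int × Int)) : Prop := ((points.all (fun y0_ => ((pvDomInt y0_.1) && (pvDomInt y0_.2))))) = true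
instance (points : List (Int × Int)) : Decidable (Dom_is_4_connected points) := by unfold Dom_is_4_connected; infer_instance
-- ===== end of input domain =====

-- B replaces A's explicit-stack DFS by a worklist-free fixed-point saturation
-- (len(point_set) rounds, each adding every in-set 4-neighbor of the visited set);
-- same return value, no speed claim.

-- ===== PORT A =====
-- directions = [(1, 0), (-1, 0), (0, 1), (0, -1)]
def pvDirs : List (Int × Int) := [(1, 0), (-1, 0), (0, 1), (0, -1)]

-- one direction's body of A's inner for-loop: visit neighbor n if in set and unvisited
def pvPush (ps : List (Int × Int)) (st : List (Int × Int) × List (Int × Int)) (n : Int × Int) :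
    List (Int × Int) × List (Int × Int) :=
  if n ∈ ps ∧ n ∉ st.1 then (st.1 ++ [n], st.2 ++ [n]) else st

-- termination helper for the while-loop: a pass over the neighbors either changes
-- nothing or strictly shrinks the set of still-unvisited points of ps
theorem pvPush_fold_measure (ps : List (Int × Int)) (l : List (Int × Int)) :
    ∀ v s : List (Int × Int),
      l.foldl (pvPush ps) (v, s) = (v, s) ∨
      (ps.toFinset \ (l.foldl (pvPush ps) (v, s)).1.toFinset).card <
        (ps.toFinset \ v.toFinset).card := by
  induction l with
  | nil => intro v s; left; rfl
  | cons n l ih =>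
    intro v s
    by_cases hc : n ∈ ps ∧ n ∉ v
    · right
      have hstep : (ps.toFinset \ (v ++ [n]).toFinset).card < (ps.toFinset \ v.toFinset).card := by
        apply Finset.card_lt_card
        constructor
        · intro x hx
          simp only [Finset.mem_sdiff, List.mem_toFinset, List.mem_append, List.mem_singleton] at hx ⊢
          exact ⟨hx.1, fun h => hx.2 (Or.inl h)⟩
        · intro hsub
          have hn : n ∈ ps.toFinset \ v.toFinset := by
            simp only [Finset.mem_sdiff, List.mem_toFinset]; exact ⟨hc.1, hc.2⟩
          have hmem := hsub hn
          simp only [Finset.mem_sdiff, List.mem_toFinset, List.mem_append, List.mem_singleton] at hmem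
          simp at hmem
      have hfold : (n :: l).foldl (pvPush ps) (v, s) = l.foldl (pvPush ps) (v ++ [n], s ++ [n]) := by
        simp only [List.foldl_cons, pvPush, if_pos hc]
      rw [hfold]
      rcases ih (v ++ [n]) (s ++ [n]) with heq | hlt
      · rw [heq]; exact hstep
      · calc _ < (ps.toFinset \ (v ++ [n]).toFinset).card := hlt
             _ < _ := hstep
    · have hfold : (n :: l).foldl (pvPush ps) (v, s) = l.foldl (pvPush ps) (v, s) := by
        simp only [List.foldl_cons, pvPush, if_neg hc]
      rw [hfold]; exact ih v s

-- the while-loop of A: pop the last stack element, push its in-set unvisited neighbors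
def pvALoop (ps : List (Int × Int)) (visited stack : List (Int × Int)) : List (Int × Int) :=
  match h : stack.getLast? with
  | none => visited
  | some p =>
      pvALoop ps
        (pvDirs.foldl (fun acc d => pvPush ps acc (p.1 + d.1, p.2 + d.2)) (visited, stack.dropLast)).1
        (pvDirs.foldl (fun acc d => pvPush ps acc (p.1 + d.1, p.2 + d.2)) (visited, stack.dropLast)).2
termination_by ((ps.toFinset \ visited.toFinset).card, stack.length)
decreasing_by
  have hne : stack ≠ [] := by intro h0; rw [h0] at h; simp at h
  have hdl : stack.dropLast.length < stack.length := by
    have := List.length_pos_of_ne_nil hne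
    simp only [List.length_dropLast]; omega
  have hmap : pvDirs.foldl (fun acc d => pvPush ps acc (p.1 + d.1, p.2 + d.2))
        (visited, stack.dropLast)
      = (pvDirs.map (fun d => (p.1 + d.1, p.2 + d.2))).foldl (pvPush ps)
        (visited, stack.dropLast) := List.foldl_map.symm
  rw [hmap]
  rcases pvPush_fold_measure ps (pvDirs.map (fun d => (p.1 + d.1, p.2 + d.2)))
      visited stack.dropLast with heq | hlt
  · rw [heq]; exact Prod.Lex.right _ hdl
  · exact Prod.Lex.left _ _ hlt

def is_4_connected (points : List (Int × Int)) : Bool :=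
  match PySem.Set.ofList points with
  | [] => false
  | s :: rest =>
      let point_set := s :: rest
      let visited := pvALoop point_set [s] [s]
      visited.length == point_set.length

-- ===== PORT B =====
-- the 4-neighborhood of a point, in B's tuple order
def pvNbrs (p : Int × Int) : List (Int × Int) :=
  [(p.1 + 1, p.2), (p.1 - 1, p.2), (p.1, p.2 + 1), (p.1, p.2 - 1)]

-- one saturation round of B: add every in-set neighbor of the snapshot of visited
def pvBRound (ps : List (Int × Int)) (visited : List (Int × Int)) : List (Int × Int) :=
  visited.foldl
    (fun acc p => (pvNbrs p).foldl (fun acc n => if n ∈ ps then PySem.Set.add acc n else acc) acc)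
    visited

def is_4_connected_alt (points : List (Int × Int)) : Bool :=
  match PySem.Set.ofList points with
  | [] => false
  | s :: rest =>
      let point_set := s :: rest
      let visited := (List.range point_set.length).foldl (fun v _ => pvBRound point_set v) [s]
      visited.length == point_set.length

-- ===== PRECONDITION & SPEC =====
def Spec_is_4_connected (points : List (Int × Int)) (out : Bool) : Prop := out = is_4_connected_alt points
instance (points : List (Int × Int)) (out : Bool) : Decidable (Spec_is_4_connected points out) := by unfold Spec_is_4_connected; infer_instance

-- ===== CLAIM (what is proved, stated in full; the proofs are below) =====
def Claim_equal_is_4_connected : Prop := ∀ (points : List (Int × Int)), Dom_is_4_connected points → Spec_is_4_connected points (is_4_connected points)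

-- ===== LEMMAS AND PROOFS =====

-- reachability from s inside ps along 4-neighbor steps (shared characterization of both ports)
inductive pvReach (ps : List (Int × Int)) (s : Int × Int) : (Int × Int) → Prop
  | refl : pvReach ps s s
  | step {p q : Int × Int} : pvReach ps s p → q ∈ pvNbrs p → q ∈ ps → pvReach ps s q

theorem pvReach_mem (ps : List (Int × Int)) (s : Int × Int) (v : List (Int × Int))
    (hs : s ∈ v) (hcl : ∀ a ∈ v, ∀ n ∈ pvNbrs a, n ∈ ps → n ∈ v) :
    ∀ x, pvReach ps s x → x ∈ v := by
  intro x h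
  induction h with
  | refl => exact hs
  | step hr hn hps ih => exact hcl _ ih _ hn hps

theorem pvALoop_nil (ps v : List (Int × Int)) : pvALoop ps v [] = v := by
  rw [pvALoop]
  split
  · rfl
  · rename_i p h'
    simp at h'

theorem pvALoop_pop (ps v st : List (Int × Int)) (p : Int × Int) (h : st.getLast? = some p) :
    pvALoop ps v st = pvALoop ps
      (pvDirs.foldl (fun acc d => pvPush ps acc (p.1 + d.1, p.2 + d.2)) (v, st.dropLast)).1
      (pvDirs.foldl (fun acc d => pvPush ps acc (p.1 + d.1, p.2 + d.2)) (v, st.dropLast)).2 := by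
  rw [pvALoop]
  split
  · rename_i h'
    rw [h'] at h; cases h
  · rename_i p' h'
    rw [h'] at h
    cases h
    rfl

-- characterization of one pass of A's inner for-loop
theorem pvPush_fold_char (ps : List (Int × Int)) (l : List (Int × Int)) :
    ∀ v s : List (Int × Int), v.Nodup →
    ∃ new : List (Int × Int),
      (l.foldl (pvPush ps) (v, s)).1 = v ++ new ∧
      (l.foldl (pvPush ps) (v, s)).2 = s ++ new ∧
      (v ++ new).Nodup ∧
      (∀ n ∈ new, n ∈ l ∧ n ∈ ps) ∧
      (∀ n ∈ l, n ∈ ps → n ∈ v ++ new) := by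
  induction l with
  | nil =>
    intro v s hv
    exact ⟨[], by simp, by simp, by simpa using hv, by simp, by simp⟩
  | cons n l ih =>
    intro v s hv
    by_cases hc : n ∈ ps ∧ n ∉ v
    · have hfold : ∀ r : (List (Int × Int) × List (Int × Int)) → List (Int × Int),
          r ((n :: l).foldl (pvPush ps) (v, s)) = r (l.foldl (pvPush ps) (v ++ [n], s ++ [n])) := by
        intro r; simp only [List.foldl_cons, pvPush, if_pos hc]
      have hv' : (v ++ [n]).Nodup := by
        rw [List.nodup_append]
        refine ⟨hv, List.nodup_singleton n, ?_⟩
        intro a ha b hb heq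
        rw [List.mem_singleton] at hb
        subst hb
        exact hc.2 (heq ▸ ha)
      obtain ⟨new, h1, h2, h3, h4, h5⟩ := ih (v ++ [n]) (s ++ [n]) hv'
      refine ⟨n :: new, ?_, ?_, ?_, ?_, ?_⟩
      · rw [hfold Prod.fst, h1]; simp
      · rw [hfold Prod.snd, h2]; simp
      · simpa using h3
      · intro m hm
        rcases List.mem_cons.mp hm with rfl | hm
        · exact ⟨List.mem_cons_self .., hc.1⟩
        · exact ⟨List.mem_cons_of_mem _ (h4 m hm).1, (h4 m hm).2⟩
      · intro m hm hmp
        rcases List.mem_cons.mp hm with rfl | hm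
        · exact List.mem_append.mpr (Or.inr (List.mem_cons_self ..))
        · have hmem := h5 m hm hmp
          simpa using hmem
    · have hfold : (n :: l).foldl (pvPush ps) (v, s) = l.foldl (pvPush ps) (v, s) := by
        simp only [List.foldl_cons, pvPush, if_neg hc]
      obtain ⟨new, h1, h2, h3, h4, h5⟩ := ih v s hv
      refine ⟨new, by rw [hfold]; exact h1, by rw [hfold]; exact h2, h3, ?_, ?_⟩
      · exact fun m hm => ⟨List.mem_cons_of_mem _ (h4 m hm).1, (h4 m hm).2⟩
      · intro m hm hmp
        rcases List.mem_cons.mp hm with rfl | hm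
        · rcases not_and_or.mp hc with h | h
          · exact absurd hmp h
          · exact List.mem_append_left _ (not_not.mp h)
        · exact h5 m hm hmp

theorem pvDirs_map (p : Int × Int) :
    pvDirs.map (fun d => (p.1 + d.1, p.2 + d.2)) = pvNbrs p := by
  simp [pvDirs, pvNbrs, sub_eq_add_neg]

-- A's while-loop computes exactly the reachable part of ps
theorem pvALoop_char (ps : List (Int × Int)) (s0 : Int × Int) :
    ∀ v st : List (Int × Int), v.Nodup → (∀ a ∈ st, a ∈ v) →
    (∀ a ∈ v, a ∈ ps ∧ pvReach ps s0 a) →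
    (∀ a ∈ v, a ∉ st → ∀ n ∈ pvNbrs a, n ∈ ps → n ∈ v) →
    s0 ∈ v →
    (pvALoop ps v st).Nodup ∧ ∀ x, x ∈ pvALoop ps v st ↔ x ∈ ps ∧ pvReach ps s0 x := by
  refine pvALoop.induct ps (motive := fun v st =>
    v.Nodup → (∀ a ∈ st, a ∈ v) →
    (∀ a ∈ v, a ∈ ps ∧ pvReach ps s0 a) →
    (∀ a ∈ v, a ∉ st → ∀ n ∈ pvNbrs a, n ∈ ps → n ∈ v) →
    s0 ∈ v →
    (pvALoop ps v st).Nodup ∧ ∀ x, x ∈ pvALoop ps v st ↔ x ∈ ps ∧ pvReach ps s0 x) ?_ ?_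
  · intro v st h hv hsub hsound hclosed hs0
    have hst : st = [] := List.getLast?_eq_none_iff.mp h
    subst hst
    rw [pvALoop_nil]
    refine ⟨hv, fun x => ⟨fun hx => hsound x hx, ?_⟩⟩
    rintro ⟨hxp, hxr⟩
    exact pvReach_mem ps s0 v hs0 (fun a ha => hclosed a ha (by simp)) x hxr
  · intro v st p h ih hv hsub hsound hclosed hs0
    have hmap : pvDirs.foldl (fun acc d => pvPush ps acc (p.1 + d.1, p.2 + d.2)) (v, st.dropLast)
        = (pvNbrs p).foldl (pvPush ps) (v, st.dropLast) := by
      rw [← pvDirs_map p]; exact List.foldl_map.symm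
    have hpv : p ∈ v := hsub p (List.mem_of_getLast? h)
    obtain ⟨st', hst'⟩ := List.getLast?_eq_some_iff.mp h
    have hdl : st.dropLast = st' := by rw [hst']; simp
    obtain ⟨new, h1, h2, h3, h4, h5⟩ := pvPush_fold_char ps (pvNbrs p) v st.dropLast hv
    have e1 : (pvDirs.foldl (fun acc d => pvPush ps acc (p.1 + d.1, p.2 + d.2)) (v, st.dropLast)).1
        = v ++ new := by rw [hmap]; exact h1
    have e2 : (pvDirs.foldl (fun acc d => pvPush ps acc (p.1 + d.1, p.2 + d.2)) (v, st.dropLast)).2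
        = st.dropLast ++ new := by rw [hmap]; exact h2
    rw [pvALoop_pop ps v st p h, e1, e2]
    rw [e1, e2] at ih
    have hnewv : ∀ n ∈ new, n ∉ v := by
      intro n hn hv'
      exact (List.disjoint_of_nodup_append h3) hv' hn
    apply ih h3
    · intro a ha
      rcases List.mem_append.mp ha with ha | ha
      · exact List.mem_append_left _ (hsub a (by rw [hst']; exact List.mem_append_left _ (hdl ▸ ha)))
      · exact List.mem_append_right _ ha
    · intro a ha
      rcases List.mem_append.mp ha with ha | ha
      · exact hsound a ha
      · obtain ⟨hn, hp⟩ := h4 a ha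
        exact ⟨hp, pvReach.step (hsound p hpv).2 hn hp⟩
    · intro a ha hnot n hn hnp
      rcases List.mem_append.mp ha with ha | ha
      · by_cases hap : a = p
        · subst hap
          exact h5 n hn hnp
        · have hnost : a ∉ st := by
            rw [hst']
            intro hmem
            rcases List.mem_append.mp hmem with hm | hm
            · exact hnot (List.mem_append_left _ (hdl ▸ hm))
            · exact hap (by simpa using hm)
          exact List.mem_append_left _ (hclosed a ha hnost n hn hnp)
      · exact absurd (List.mem_append_right st.dropLast ha) hnot
    · exact List.mem_append_left _ hs0

-- characterization of B's inner loop over one point's neighbors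
theorem pvBInner_char (ps : List (Int × Int)) (l : List (Int × Int)) :
    ∀ acc : List (Int × Int), acc.Nodup →
      (l.foldl (fun acc n => if n ∈ ps then PySem.Set.add acc n else acc) acc).Nodup ∧
      ∀ x, x ∈ l.foldl (fun acc n => if n ∈ ps then PySem.Set.add acc n else acc) acc ↔
        x ∈ acc ∨ (x ∈ l ∧ x ∈ ps) := by
  induction l with
  | nil => intro acc h; exact ⟨h, by simp⟩
  | cons n l ih =>
    intro acc h
    by_cases hn : n ∈ ps
    · have hnd : (PySem.Set.add acc n).Nodup := PySem.Set.nodup_add acc n h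
      obtain ⟨h1, h2⟩ := ih (PySem.Set.add acc n) hnd
      refine ⟨by simpa [hn] using h1, ?_⟩
      intro x
      rw [List.foldl_cons, if_pos hn, h2, PySem.Set.mem_add]
      constructor
      · rintro ((hx | rfl) | ⟨hl, hp⟩)
        · exact Or.inl hx
        · exact Or.inr ⟨List.mem_cons_self .., hn⟩
        · exact Or.inr ⟨List.mem_cons_of_mem _ hl, hp⟩
      · rintro (hx | ⟨hl, hp⟩)
        · exact Or.inl (Or.inl hx)
        · rcases List.mem_cons.mp hl with rfl | hl
          · exact Or.inl (Or.inr rfl)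
          · exact Or.inr ⟨hl, hp⟩
    · obtain ⟨h1, h2⟩ := ih acc h
      refine ⟨by simpa [hn] using h1, ?_⟩
      intro x
      rw [List.foldl_cons, if_neg hn, h2]
      constructor
      · rintro (hx | ⟨hl, hp⟩)
        · exact Or.inl hx
        · exact Or.inr ⟨List.mem_cons_of_mem _ hl, hp⟩
      · rintro (hx | ⟨hl, hp⟩)
        · exact Or.inl hx
        · rcases List.mem_cons.mp hl with rfl | hl
          · exact absurd hp hn
          · exact Or.inr ⟨hl, hp⟩

theorem pvBOuter_char (ps : List (Int × Int)) (l : List (Int × Int)) :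
    ∀ acc : List (Int × Int), acc.Nodup →
      (l.foldl (fun acc p => (pvNbrs p).foldl
          (fun acc n => if n ∈ ps then PySem.Set.add acc n else acc) acc) acc).Nodup ∧
      ∀ x, x ∈ l.foldl (fun acc p => (pvNbrs p).foldl
          (fun acc n => if n ∈ ps then PySem.Set.add acc n else acc) acc) acc ↔
        x ∈ acc ∨ ∃ p ∈ l, x ∈ pvNbrs p ∧ x ∈ ps := by
  induction l with
  | nil => intro acc h; exact ⟨h, by simp⟩
  | cons p l ih =>
    intro acc h
    obtain ⟨h1, h2⟩ := pvBInner_char ps (pvNbrs p) acc h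
    obtain ⟨h3, h4⟩ := ih _ h1
    refine ⟨h3, ?_⟩
    intro x
    rw [List.foldl_cons, h4, h2]
    constructor
    · rintro ((hx | ⟨hn, hp⟩) | ⟨q, hq, hn, hp⟩)
      · exact Or.inl hx
      · exact Or.inr ⟨p, List.mem_cons_self .., hn, hp⟩
      · exact Or.inr ⟨q, List.mem_cons_of_mem _ hq, hn, hp⟩
    · rintro (hx | ⟨q, hq, hn, hp⟩)
      · exact Or.inl (Or.inl hx)
      · rcases List.mem_cons.mp hq with rfl | hq
        · exact Or.inl (Or.inr ⟨hn, hp⟩)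
        · exact Or.inr ⟨q, hq, hn, hp⟩

theorem pvBRound_char (ps v : List (Int × Int)) (hv : v.Nodup) :
    (pvBRound ps v).Nodup ∧
    ∀ x, x ∈ pvBRound ps v ↔ x ∈ v ∨ ∃ p ∈ v, x ∈ pvNbrs p ∧ x ∈ ps :=
  pvBOuter_char ps v v hv

-- the saturation iterates
def pvIter (ps : List (Int × Int)) (s : Int × Int) (k : Nat) : List (Int × Int) :=
  (List.range k).foldl (fun v _ => pvBRound ps v) [s]

theorem pvIter_succ (ps : List (Int × Int)) (s : Int × Int) (k : Nat) :
    pvIter ps s (k + 1) = pvBRound ps (pvIter ps s k) := by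
  simp [pvIter, List.range_succ]

theorem pvIter_nodup (ps : List (Int × Int)) (s : Int × Int) : ∀ k, (pvIter ps s k).Nodup := by
  intro k
  induction k with
  | zero => simp [pvIter]
  | succ k ih => rw [pvIter_succ]; exact (pvBRound_char ps _ ih).1

theorem pvIter_subset_succ (ps : List (Int × Int)) (s : Int × Int) (k : Nat) :
    ∀ x ∈ pvIter ps s k, x ∈ pvIter ps s (k + 1) := by
  intro x hx
  rw [pvIter_succ, ((pvBRound_char ps _ (pvIter_nodup ps s k)).2 x)]
  exact Or.inl hx

theorem pvIter_subset (ps : List (Int × Int)) (s : Int × Int) {k m : Nat} (h : k ≤ m) :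
    ∀ x ∈ pvIter ps s k, x ∈ pvIter ps s m := by
  induction m, h using Nat.le_induction with
  | base => exact fun x hx => hx
  | succ m hm ih => exact fun x hx => pvIter_subset_succ ps s m x (ih x hx)

theorem pvIter_sound (ps : List (Int × Int)) (s : Int × Int) (hs : s ∈ ps) :
    ∀ k, ∀ x ∈ pvIter ps s k, x ∈ ps ∧ pvReach ps s x := by
  intro k
  induction k with
  | zero =>
    intro x hx
    simp only [pvIter, List.range_zero, List.foldl_nil, List.mem_singleton] at hx
    subst hx; exact ⟨hs, pvReach.refl⟩
  | succ k ih =>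
    intro x hx
    rw [pvIter_succ, ((pvBRound_char ps _ (pvIter_nodup ps s k)).2 x)] at hx
    rcases hx with hx | ⟨p, hp, hn, hxp⟩
    · exact ih x hx
    · exact ⟨hxp, pvReach.step (ih p hp).2 hn hxp⟩

-- within ps.length rounds the iteration stalls
theorem pvIter_stall (ps : List (Int × Int)) (s : Int × Int) (hps : ps.Nodup) (hs : s ∈ ps) :
    ∃ k, k < ps.length ∧ ∀ x, x ∈ pvIter ps s (k + 1) ↔ x ∈ pvIter ps s k := by
  by_contra hcon
  have hcon' : ∀ k, k < ps.length → ∃ x, ¬ (x ∈ pvIter ps s (k + 1) ↔ x ∈ pvIter ps s k) := by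
    intro k hk
    by_contra hall
    exact hcon ⟨k, hk, fun x => by
      rcases not_exists.mp hall x with h
      exact not_not.mp (fun hneg => h hneg)⟩
  have hgrow : ∀ k, k < ps.length →
      (pvIter ps s k).toFinset.card + 1 ≤ (pvIter ps s (k + 1)).toFinset.card := by
    intro k hk
    obtain ⟨x, hx⟩ := hcon' k hk
    have hxmem : x ∈ pvIter ps s (k + 1) ∧ x ∉ pvIter ps s k := by
      by_cases hxk : x ∈ pvIter ps s k
      · exact absurd (iff_of_true (pvIter_subset_succ ps s k x hxk) hxk) hx
      · by_cases hxk1 : x ∈ pvIter ps s (k + 1)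
        · exact ⟨hxk1, hxk⟩
        · exact absurd (iff_of_false hxk1 hxk) hx
    have hss : (pvIter ps s k).toFinset ⊂ (pvIter ps s (k + 1)).toFinset := by
      constructor
      · intro y hy
        simp only [List.mem_toFinset] at hy ⊢
        exact pvIter_subset_succ ps s k y hy
      · intro hsub
        exact hxmem.2 (List.mem_toFinset.mp (hsub (List.mem_toFinset.mpr hxmem.1)))
    exact Finset.card_lt_card hss
  have hcard : ∀ k, k ≤ ps.length → k + 1 ≤ (pvIter ps s k).toFinset.card := by
    intro k
    induction k with
    | zero =>
      intro _
      have hmem : s ∈ (pvIter ps s 0).toFinset := by simp [pvIter]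
      exact Finset.card_pos.mpr ⟨s, hmem⟩
    | succ k ih =>
      intro hk
      have hg := hgrow k (by omega)
      have hi := ih (by omega)
      omega
  have hub : (pvIter ps s ps.length).toFinset.card ≤ ps.length := by
    have hsub : (pvIter ps s ps.length).toFinset ⊆ ps.toFinset := by
      intro x hx
      simp only [List.mem_toFinset] at hx ⊢
      exact (pvIter_sound ps s hs ps.length x hx).1
    calc (pvIter ps s ps.length).toFinset.card ≤ ps.toFinset.card := Finset.card_le_card hsub
      _ = ps.length := List.toFinset_card_of_nodup hps
  have hlast := hcard ps.length (le_refl _)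
  omega

theorem pvIter_stable (ps : List (Int × Int)) (s : Int × Int) (k : Nat)
    (hk : ∀ x, x ∈ pvIter ps s (k + 1) ↔ x ∈ pvIter ps s k) :
    ∀ m, k ≤ m → ∀ x, x ∈ pvIter ps s m ↔ x ∈ pvIter ps s k := by
  intro m hm
  induction m, hm using Nat.le_induction with
  | base => intro x; rfl
  | succ m hm ih =>
    intro x
    rw [pvIter_succ, ((pvBRound_char ps _ (pvIter_nodup ps s m)).2 x)]
    rw [← hk x, pvIter_succ, ((pvBRound_char ps _ (pvIter_nodup ps s k)).2 x)]
    constructor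
    · rintro (hx | ⟨p, hp, hn, hxp⟩)
      · exact Or.inl ((ih x).mp hx)
      · exact Or.inr ⟨p, (ih p).mp hp, hn, hxp⟩
    · rintro (hx | ⟨p, hp, hn, hxp⟩)
      · exact Or.inl ((ih x).mpr hx)
      · exact Or.inr ⟨p, (ih p).mpr hp, hn, hxp⟩

-- B's final visited set is exactly the reachable part of ps
theorem pvIter_char (ps : List (Int × Int)) (s : Int × Int) (hps : ps.Nodup) (hs : s ∈ ps) :
    ∀ x, x ∈ pvIter ps s ps.length ↔ x ∈ ps ∧ pvReach ps s x := by
  obtain ⟨k, hklt, hk⟩ := pvIter_stall ps s hps hs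
  have hstab := pvIter_stable ps s k hk
  have hcl : ∀ a ∈ pvIter ps s ps.length, ∀ n ∈ pvNbrs a, n ∈ ps → n ∈ pvIter ps s ps.length := by
    intro a ha n hn hnp
    have hak : a ∈ pvIter ps s k := (hstab ps.length (by omega) a).mp ha
    have hmem : n ∈ pvIter ps s (k + 1) := by
      rw [pvIter_succ, ((pvBRound_char ps _ (pvIter_nodup ps s k)).2 n)]
      exact Or.inr ⟨a, hak, hn, hnp⟩
    exact (hstab ps.length (by omega) n).mpr ((hk n).mp hmem)
  intro x
  constructor
  · exact fun hx => pvIter_sound ps s hs ps.length x hx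
  · rintro ⟨hxp, hxr⟩
    have hs0 : s ∈ pvIter ps s ps.length := by
      apply pvIter_subset ps s (Nat.zero_le _)
      simp [pvIter]
    exact pvReach_mem ps s _ hs0 hcl x hxr

-- ===== VERDICT (by name: the statement is the Claim_ definition above) =====
theorem is_4_connected_spec : Claim_equal_is_4_connected := by
  intro points _
  unfold Spec_is_4_connected is_4_connected is_4_connected_alt
  cases hcase : PySem.Set.ofList points with
  | nil => rfl
  | cons s rest =>
    have hnd : (s :: rest).Nodup := hcase ▸ PySem.Set.nodup_ofList points
    have hs : s ∈ s :: rest := List.mem_cons_self ..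
    have hA := pvALoop_char (s :: rest) s [s] [s] (by simp) (by simp)
      (by intro a ha
          simp only [List.mem_singleton] at ha
          subst ha; exact ⟨hs, pvReach.refl⟩)
      (by intro a ha hnot; exact absurd ha hnot)
      (by simp)
    have hB := pvIter_char (s :: rest) s hnd hs
    have hBnd : (pvIter (s :: rest) s (s :: rest).length).Nodup := pvIter_nodup _ _ _
    have hfin : (pvALoop (s :: rest) [s] [s]).toFinset
        = (pvIter (s :: rest) s (s :: rest).length).toFinset := by
      apply Finset.ext
      intro x
      simp only [List.mem_toFinset]
      rw [hA.2 x, hB x]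
    have hlen : (pvALoop (s :: rest) [s] [s]).length
        = (pvIter (s :: rest) s (s :: rest).length).length := by
      rw [← List.toFinset_card_of_nodup hA.1, ← List.toFinset_card_of_nodup hBnd, hfin]
    simp only []
    rw [show ((List.range (s :: rest).length).foldl (fun v _ => pvBRound (s :: rest) v) [s])
        = pvIter (s :: rest) s (s :: rest).length from rfl]
    rw [hlen]
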